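-- pv_equiv track=rewrite | github.com/andreportol/ASSISTENTE_SINTER | app/core/agents/semantic_interpreter.py | _last_assistant_prompted_year
-- ===== SOURCE A (Python) =====
-- import unicodedata
--
-- def _normalize(text: str) -> str:
--     cleaned = unicodedata.normalize("NFKD", text or "")
--     cleaned = cleaned.encode("ascii", "ignore").decode("ascii")
--     return cleaned.lower()
--
-- def _last_assistant_prompted_year(history: list[tuple[str, str]] | None) -> bool:
--     if not history:
--         return False
--     for role, content in reversed(history):
--         if not content:
--             continue
--         if role == "assistant":
--             return "qual ano" in _normalize(content)
--         if role == "user":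
--             return False
--     return False
-- ===== SOURCE B (Python) =====
-- import unicodedata
--
--
-- def _normalize(text: str) -> str:
--     cleaned = unicodedata.normalize("NFKD", text or "")
--     cleaned = cleaned.encode("ascii", "ignore").decode("ascii")
--     return cleaned.lower()
--
--
-- def _last_assistant_prompted_year(history):
--     # Forward single pass: remember the last non-empty assistant/user message.
--     last = None
--     for role, content in (history or []):
--         if content and role in ("assistant", "user"):
--             last = (role, content)
--     if last is None:
--         return False
--     role, content = last
--     return role == "assistant" and "qual ano" in _normalize(content)
-- ===== Notes on version B (the rewrite author's own statement) =====
-- stated objective: alternative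
-- what changed: Replaces the reversed-iteration early-return scan with a forward single pass that accumulates the last qualifying (assistant/user, non-empty) message and decides once after the loop.
import Mathlib
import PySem

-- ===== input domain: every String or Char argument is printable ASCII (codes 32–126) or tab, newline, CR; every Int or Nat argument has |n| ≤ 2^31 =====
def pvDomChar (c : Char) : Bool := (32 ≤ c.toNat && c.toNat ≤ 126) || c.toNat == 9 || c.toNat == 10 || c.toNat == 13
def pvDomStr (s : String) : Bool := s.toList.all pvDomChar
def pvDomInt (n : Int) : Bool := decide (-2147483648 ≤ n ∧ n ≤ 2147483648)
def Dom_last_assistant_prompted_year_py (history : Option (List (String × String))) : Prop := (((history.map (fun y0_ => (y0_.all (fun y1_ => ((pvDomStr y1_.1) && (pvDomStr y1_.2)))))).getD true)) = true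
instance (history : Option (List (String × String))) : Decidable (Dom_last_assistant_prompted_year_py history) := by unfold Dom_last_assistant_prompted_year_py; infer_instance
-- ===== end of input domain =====

-- ===== PORT A =====
-- B changes the decomposition: forward accumulating pass instead of A's reversed early-return scan.
-- _normalize: NFKD + ascii-ignore is the identity on the printable-ASCII domain (Dom), so only .lower() remains; exact on Dom.
def normalize_py (text : String) : String := PySem.Str.lower text

-- the reversed(history) loop of A, consuming the reversed list front-to-back
def pvALoop : List (String × String) → Bool
  | [] => false
  | (role, content) :: rest =>
    if content = "" then pvALoop rest
    else if role = "assistant" then PySem.Str.isIn "qual ano" (normalize_py content)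
    else if role = "user" then false
    else pvALoop rest

def last_assistant_prompted_year_py (history : Option (List (String × String))) : Bool :=
  match history with
  | none => false
  | some h => if h = [] then false else pvALoop h.reverse

-- ===== PORT B =====
-- keep the last non-empty assistant/user message seen so far
def pvStep (last : Option (String × String)) (p : String × String) : Option (String × String) :=
  if p.2 ≠ "" ∧ (p.1 = "assistant" ∨ p.1 = "user") then some p else last

-- decide once after the loop
def pvCheck : Option (String × String) → Bool
  | none => false
  | some (role, content) => role == "assistant" && PySem.Str.isIn "qual ano" (normalize_py content)

def last_assistant_prompted_year_py_alt (history : Option (List (String × String))) : Bool :=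
  pvCheck ((history.getD []).foldl pvStep none)

-- ===== PRECONDITION & SPEC =====
def Spec_last_assistant_prompted_year_py (history : Option (List (String × String))) (out : Bool) : Prop := out = last_assistant_prompted_year_py_alt history
instance (history : Option (List (String × String))) (out : Bool) : Decidable (Spec_last_assistant_prompted_year_py history out) := by unfold Spec_last_assistant_prompted_year_py; infer_instance

-- ===== CLAIM (what is proved, stated in full; the proofs are below) =====
def Claim_equal_last_assistant_prompted_year_py : Prop := ∀ (history : Option (List (String × String))), Dom_last_assistant_prompted_year_py history → Spec_last_assistant_prompted_year_py history (last_assistant_prompted_year_py history)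

-- ===== LEMMAS AND PROOFS =====

-- A's loop with an arbitrary continuation value for the fall-through case
def pvALoopK (k : Bool) : List (String × String) → Bool
  | [] => k
  | (role, content) :: rest =>
    if content = "" then pvALoopK k rest
    else if role = "assistant" then PySem.Str.isIn "qual ano" (normalize_py content)
    else if role = "user" then false
    else pvALoopK k rest

lemma pvALoopK_false (l : List (String × String)) : pvALoopK false l = pvALoop l := by
  induction l with
  | nil => rfl
  | cons p rest ih => obtain ⟨role, content⟩ := p; simp [pvALoopK, pvALoop, ih]

lemma pvALoopK_append (a b : List (String × String)) (k : Bool) :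
    pvALoopK k (a ++ b) = pvALoopK (pvALoopK k b) a := by
  induction a with
  | nil => rfl
  | cons p rest ih => obtain ⟨role, content⟩ := p; simp [pvALoopK, ih]

lemma pvCheck_step (acc : Option (String × String)) (p : String × String) :
    pvCheck (pvStep acc p) = pvALoopK (pvCheck acc) [p] := by
  obtain ⟨role, content⟩ := p
  by_cases hc : content = "" <;>
    by_cases ha : role = "assistant" <;>
      by_cases hu : role = "user" <;>
        simp [pvStep, pvCheck, pvALoopK, hc, ha, hu]

lemma pvMain (h : List (String × String)) (acc : Option (String × String)) :
    pvCheck (h.foldl pvStep acc) = pvALoopK (pvCheck acc) h.reverse := by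
  induction h generalizing acc with
  | nil => rfl
  | cons p rest ih =>
    simp only [List.foldl_cons, List.reverse_cons, pvALoopK_append, ← pvCheck_step, ih]

-- ===== VERDICT (by name: the statement is the Claim_ definition above) =====
theorem last_assistant_prompted_year_py_spec : Claim_equal_last_assistant_prompted_year_py := by
  intro history _
  unfold Spec_last_assistant_prompted_year_py last_assistant_prompted_year_py last_assistant_prompted_year_py_alt
  cases history with
  | none => rfl
  | some h =>
    simp only [Option.getD_some, pvMain h none]
    show (if h = [] then false else pvALoop h.reverse) = pvALoopK (pvCheck none) h.reverse
    by_cases he : h = []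
    · subst he; rfl
    · simp [he, ← pvALoopK_false]; rfl
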